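-- pv_equiv track=rewrite | github.com/valgardg/leetcode | 3871. Count Commas in Range II/Solution.py | countCommas
-- ===== SOURCE A (Python) =====
-- def countCommas(n: int) -> int:
--     total_commas = 0
--     if n < 1000:
--         return 0
--     # thousands
--     for i in range(4, len(str(n))+1, 3):
--         # minus value
--         min_val = int("1" + ("0" * (i - 1)))
--         total_commas += n - min_val + 1
--     return total_commas
-- ===== SOURCE B (Python) =====
-- def countCommas(n: int) -> int:
--     if n < 1000:
--         return 0
--     total = 0
--     for d in range(4, len(str(n)) + 1):
--         hi = min(n, 10 ** d - 1)
--         total += ((d - 1) // 3) * (hi - 10 ** (d - 1) + 1)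
--     return total
-- ===== Notes on version B (the rewrite author's own statement) =====
-- stated objective: alternative
-- what changed: A sweeps the comma thresholds (successive powers of a thousand) with a step-3 stride over string length, adding n minus threshold plus one per stride; B instead groups the numbers by digit length and multiplies each length bucket's size by its per-number comma count.
import Mathlib
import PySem

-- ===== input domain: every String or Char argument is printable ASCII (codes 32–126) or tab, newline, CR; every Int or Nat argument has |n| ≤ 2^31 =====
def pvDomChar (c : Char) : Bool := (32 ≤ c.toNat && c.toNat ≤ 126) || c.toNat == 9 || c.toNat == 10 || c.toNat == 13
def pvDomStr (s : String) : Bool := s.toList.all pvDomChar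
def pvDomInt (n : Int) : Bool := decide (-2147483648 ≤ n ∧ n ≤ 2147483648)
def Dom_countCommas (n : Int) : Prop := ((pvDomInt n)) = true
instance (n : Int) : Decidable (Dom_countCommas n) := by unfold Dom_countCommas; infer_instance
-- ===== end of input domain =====

-- B replaces A's step-3 sweep over comma thresholds by a step-1 loop over digit lengths,
-- weighting each digit-length bucket by its per-number comma count (alternative algorithm, same cost).

-- ===== PORT A =====
-- int("1" + "0" * (i - 1)), at the character-list level; int() never fails on this
-- string, so .getD 0 is exact.  "0" * k repeats max(0, k) times, as .toNat does.
def pvMinVal (i : Int) : Int :=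
  (PySem.Int.ofChars? ('1' :: List.replicate (i - 1).toNat '0')).getD 0

def countCommas (n : Int) : Int :=
  if n < 1000 then 0
  else
    (PySem.List.pyRange 4 (PySem.Str.len (PySem.Int.toStr n) + 1) 3).foldl
      (fun total_commas i => total_commas + (n - pvMinVal i + 1)) 0

-- ===== PORT B =====
-- 10 ** d with d ≥ 4 inside the loop: ported as (10 : Int) ^ d.toNat (exact for d ≥ 0)
def countCommas_alt (n : Int) : Int :=
  if n < 1000 then 0
  else
    (PySem.List.pyRange 4 (PySem.Str.len (PySem.Int.toStr n) + 1) 1).foldl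
      (fun total d =>
        total + PySem.Int.floordiv (d - 1) 3 *
          (min n ((10 : Int) ^ d.toNat - 1) - (10 : Int) ^ (d - 1).toNat + 1)) 0

-- ===== PRECONDITION & SPEC =====
def Spec_countCommas (n : Int) (out : Int) : Prop := out = countCommas_alt n
instance (n : Int) (out : Int) : Decidable (Spec_countCommas n out) := by unfold Spec_countCommas; infer_instance

-- ===== CLAIM (what is proved, stated in full; the proofs are below) =====
def Claim_equal_countCommas : Prop := ∀ (n : Int), Dom_countCommas n → Spec_countCommas n (countCommas n)

-- ===== LEMMAS AND PROOFS =====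

lemma toDigitsCore_length_eq (fuel : ℕ) : ∀ (n : ℕ) (ds : List Char), n < fuel →
    (Nat.toDigitsCore 10 fuel n ds).length = Nat.log 10 n + 1 + ds.length := by
  induction fuel with
  | zero => intro n ds h; omega
  | succ f ih =>
    intro n ds h
    show (if n / 10 = 0 then (n % 10).digitChar :: ds
          else Nat.toDigitsCore 10 f (n / 10) ((n % 10).digitChar :: ds)).length = _
    by_cases h10 : n / 10 = 0
    · have hn : n < 10 := by omega
      have : Nat.log 10 n = 0 := Nat.log_eq_zero_iff.mpr (Or.inl hn)
      simp [h10, this]; omega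
    · have hn : 10 ≤ n := by
        by_contra hc
        exact h10 (Nat.div_eq_of_lt (by omega))
      have hdiv : n / 10 < f := by
        have := Nat.div_lt_self (by omega : 0 < n) (by omega : 1 < 10)
        omega
      rw [if_neg h10, ih (n / 10) _ hdiv]
      have hlog : Nat.log 10 (n / 10) = Nat.log 10 n - 1 := Nat.log_div_base 10 n
      have hpos : 0 < Nat.log 10 n := Nat.log_pos (by omega) hn
      simp only [List.length_cons]
      omega

lemma toStr_len_of_pos (n : Int) (h : 0 < n) :
    PySem.Str.len (PySem.Int.toStr n) = ((Nat.log 10 n.toNat + 1 : ℕ) : Int) := by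
  show ((String.ofList (PySem.Int.toChars n)).toList.length : Int) = _
  rw [String.toList_ofList]
  show ((if n < 0 then '-' :: Nat.toDigits 10 n.natAbs else Nat.toDigits 10 n.toNat).length : Int) = _
  rw [if_neg (by omega)]
  rw [show Nat.toDigits 10 n.toNat = Nat.toDigitsCore 10 (n.toNat + 1) n.toNat [] from rfl]
  rw [toDigitsCore_length_eq _ _ _ (by omega)]
  simp


lemma pv_r5 : PySem.List.pyRange 4 5 3 = [4] := by decide
lemma pv_r6 : PySem.List.pyRange 4 6 3 = [4] := by decide
lemma pv_r7 : PySem.List.pyRange 4 7 3 = [4] := by decide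
lemma pv_r8 : PySem.List.pyRange 4 8 3 = [4, 7] := by decide
lemma pv_r9 : PySem.List.pyRange 4 9 3 = [4, 7] := by decide
lemma pv_r10 : PySem.List.pyRange 4 10 3 = [4, 7] := by decide
lemma pv_r11 : PySem.List.pyRange 4 11 3 = [4, 7, 10] := by decide
lemma pv_s5 : PySem.List.pyRange 4 5 1 = [4] := by decide
lemma pv_s6 : PySem.List.pyRange 4 6 1 = [4, 5] := by decide
lemma pv_s7 : PySem.List.pyRange 4 7 1 = [4, 5, 6] := by decide
lemma pv_s8 : PySem.List.pyRange 4 8 1 = [4, 5, 6, 7] := by decide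
lemma pv_s9 : PySem.List.pyRange 4 9 1 = [4, 5, 6, 7, 8] := by decide
lemma pv_s10 : PySem.List.pyRange 4 10 1 = [4, 5, 6, 7, 8, 9] := by decide
lemma pv_s11 : PySem.List.pyRange 4 11 1 = [4, 5, 6, 7, 8, 9, 10] := by decide
lemma pv_t4 : (4 : Int).toNat = 4 := rfl
lemma pv_t5 : (5 : Int).toNat = 5 := rfl
lemma pv_t6 : (6 : Int).toNat = 6 := rfl
lemma pv_t7 : (7 : Int).toNat = 7 := rfl
lemma pv_t8 : (8 : Int).toNat = 8 := rfl
lemma pv_t9 : (9 : Int).toNat = 9 := rfl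
lemma pv_t10 : (10 : Int).toNat = 10 := rfl
lemma pv_m4 : pvMinVal 4 = 1000 := by decide
lemma pv_m7 : pvMinVal 7 = 1000000 := by decide
lemma pv_m10 : pvMinVal 10 = 1000000000 := by decide

-- ===== VERDICT (by name: the statement is the Claim_ definition above) =====
theorem countCommas_spec : Claim_equal_countCommas := by
  intro n hdom
  unfold Spec_countCommas countCommas countCommas_alt
  by_cases hsmall : n < 1000
  · simp [hsmall]
  · rw [if_neg hsmall, if_neg hsmall]
    have hn1000 : 1000 ≤ n := by omega
    have hdom' : n ≤ 2147483648 := by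
      have h := hdom
      unfold Dom_countCommas pvDomInt at h
      exact (of_decide_eq_true h).2
    set L := Nat.log 10 n.toNat + 1 with hLdef
    have hL : PySem.Str.len (PySem.Int.toStr n) = (L : Int) :=
      toStr_len_of_pos n (by omega)
    have hp1 : ((10 : ℕ) ^ (L - 1) : ℕ) ≤ n.toNat := by
      simpa [hLdef] using Nat.pow_log_le_self 10 (x := n.toNat) (by omega)
    have hp2 : n.toNat < (10 : ℕ) ^ L := Nat.lt_pow_succ_log_self (by omega) n.toNat
    have htn : ((n.toNat : Int)) = n := Int.toNat_of_nonneg (by omega)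
    have hp1' : (10 : Int) ^ (L - 1) ≤ n := by
      have h : ((10 ^ (L - 1) : ℕ) : Int) ≤ (n.toNat : Int) := by exact_mod_cast hp1
      rw [htn] at h; push_cast at h; exact h
    have hp2' : n < (10 : Int) ^ L := by
      have h : ((n.toNat : Int)) < ((10 ^ L : ℕ) : Int) := by exact_mod_cast hp2
      rw [htn] at h; push_cast at h; exact h
    have h4 : 4 ≤ L := by
      by_contra hc
      have : (10 : Int) ^ L ≤ 10 ^ 3 := by
        apply pow_le_pow_right₀ (by norm_num); omega
      norm_num at this; omega
    have h10 : L ≤ 10 := by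
      by_contra hc
      have : (10 : Int) ^ 10 ≤ 10 ^ (L - 1) := by
        apply pow_le_pow_right₀ (by norm_num); omega
      norm_num at this; omega
    clear_value L
    rw [hL]
    interval_cases L <;>
      · norm_num at hp1' hp2' ⊢
        simp only [pv_r5, pv_r6, pv_r7, pv_r8, pv_r9, pv_r10, pv_r11,
                   pv_s5, pv_s6, pv_s7, pv_s8, pv_s9, pv_s10, pv_s11, List.foldl,
                   pv_m4, pv_m7, pv_m10]
        norm_num [PySem.Int.floordiv, pv_t4, pv_t5, pv_t6, pv_t7, pv_t8, pv_t9, pv_t10]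
        omega
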